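-- pv_equiv track=rewrite | github.com/FelixBroecker/MA | my_csf.py | check_geneological
-- ===== SOURCE A (Python) =====
-- def check_geneological(x, major_spin):
--     """check if particular path is allowed according to geneological coupling scheme"""
--     res = []
--     # define criterion for step in genealogical spin depending on major spin
--     if major_spin >= 0:
--         step_allowed = lambda S: S < 0
--     elif major_spin < 0:
--         step_allowed = lambda S: S > 0
--     # check which steps are allowed
--     for path in x:
--         S = 0
--         for i, step in enumerate(path):
--             S += step
--             if step_allowed(S):
--                 break
--             if i == len(path)-1:
--                 res.append(path)
--     return res
-- ===== SOURCE B (Python) =====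
-- def check_geneological(x, major_spin):
--     """check if particular path is allowed according to geneological coupling scheme"""
--     def prefix_sums(p):
--         s = 0
--         return [s := s + v for v in p]
--     if major_spin >= 0:
--         return [p for p in x if p and min(prefix_sums(p)) >= 0]
--     return [p for p in x if p and max(prefix_sums(p)) <= 0]
-- ===== Notes on version B (the rewrite author's own statement) =====
-- stated objective: simpler
-- what changed: Replaces the stepwise running-sum loop with break/append and index bookkeeping by a filter comprehension that computes each path's prefix sums once and compares a single extremum (min>=0 or max<=0) against the bound.
import Mathlib
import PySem

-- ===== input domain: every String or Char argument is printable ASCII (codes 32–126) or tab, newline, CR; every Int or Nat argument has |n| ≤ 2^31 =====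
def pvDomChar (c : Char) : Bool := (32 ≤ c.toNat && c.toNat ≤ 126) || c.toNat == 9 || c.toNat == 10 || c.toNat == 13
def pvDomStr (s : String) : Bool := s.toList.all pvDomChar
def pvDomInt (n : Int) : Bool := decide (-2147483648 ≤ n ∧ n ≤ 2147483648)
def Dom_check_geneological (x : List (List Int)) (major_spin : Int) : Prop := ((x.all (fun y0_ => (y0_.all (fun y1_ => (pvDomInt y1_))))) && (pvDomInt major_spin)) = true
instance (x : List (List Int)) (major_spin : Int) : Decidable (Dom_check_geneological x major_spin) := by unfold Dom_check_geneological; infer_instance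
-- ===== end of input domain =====

-- B replaces A's stepwise running-sum loop (break/append with index bookkeeping) by a
-- filter over paths comparing one extremum of the prefix sums against the bound; objective: simpler.


-- ===== PORT A =====
-- inner 'for i, step in enumerate(path)' loop: S running sum, i index, n = len(path);
-- returns true iff the loop reaches 'res.append(path)'
def pvInnerA (pred : Int → Bool) : List Int → Int → Int → Int → Bool
  | [], _, _, _ => false
  | step :: t, S, i, n =>
    let S' := S + step
    if pred S' then false
    else if i = n - 1 then true
    else pvInnerA pred t S' (i + 1) n

def check_geneological (x : List (List Int)) (major_spin : Int) : List (List Int) :=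
  let step_allowed : Int → Bool :=
    if major_spin ≥ 0 then (fun S => S < 0) else (fun S => S > 0)
  x.foldl (fun res path =>
    if pvInnerA step_allowed path 0 0 (path.length : Int) then res ++ [path] else res) []

-- ===== PORT B =====
-- prefix_sums helper of Source B (running sum s, emitted at every element)
def pvAccumFrom (S : Int) : List Int → List Int
  | [] => []
  | h :: t => (S + h) :: pvAccumFrom (S + h) t

def pvPrefixSums (p : List Int) : List Int := pvAccumFrom 0 p

-- Python min/max of a nonempty list (B only applies them to nonempty lists)
def pvMinL : List Int → Int
  | [] => 0
  | h :: t => t.foldl min h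

def pvMaxL : List Int → Int
  | [] => 0
  | h :: t => t.foldl max h

def check_geneological_alt (x : List (List Int)) (major_spin : Int) : List (List Int) :=
  if major_spin ≥ 0 then
    x.filter (fun p => !p.isEmpty && decide (0 ≤ pvMinL (pvPrefixSums p)))
  else
    x.filter (fun p => !p.isEmpty && decide (pvMaxL (pvPrefixSums p) ≤ 0))

-- ===== PRECONDITION & SPEC =====
def Spec_check_geneological (x : List (List Int)) (major_spin : Int) (out : List (List Int)) : Prop := out = check_geneological_alt x major_spin
instance (x : List (List Int)) (major_spin : Int) (out : List (List Int)) : Decidable (Spec_check_geneological x major_spin out) := by unfold Spec_check_geneological; infer_instance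

-- ===== CLAIM (what is proved, stated in full; the proofs are below) =====
def Claim_equal_check_geneological : Prop := ∀ (x : List (List Int)) (major_spin : Int), Dom_check_geneological x major_spin → Spec_check_geneological x major_spin (check_geneological x major_spin)

-- ===== LEMMAS AND PROOFS =====

-- "all prefix sums starting from S avoid pred"
def pvAllOk (pred : Int → Bool) : Int → List Int → Bool
  | _, [] => true
  | S, h :: t => !pred (S + h) && pvAllOk pred (S + h) t

theorem pvInnerA_eq_allOk (pred : Int → Bool) :
    ∀ (p : List Int) (S k : Int),
      pvInnerA pred p S k (k + (p.length : Int)) = (!p.isEmpty && pvAllOk pred S p) := by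
  intro p
  induction p with
  | nil => intro S k; simp [pvInnerA]
  | cons h t ih =>
    intro S k
    simp only [pvInnerA, pvAllOk, List.isEmpty]
    by_cases hp : pred (S + h)
    · simp [hp]
    · simp only [hp, if_false, Bool.not_false, Bool.true_and]
      by_cases ht : t = []
      · subst ht
        have : k = k + ((1 : Nat) : Int) - 1 := by omega
        simp [← this, pvAllOk, hp]
      · have hlen : (t.length : Int) ≥ 1 := by
          have : t.length ≥ 1 := List.length_pos_iff.mpr ht
          exact_mod_cast this
        have hne : ¬ (k = k + (((h :: t).length : Nat) : Int) - 1) := by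
          simp only [List.length_cons]; push_cast; omega
        rw [if_neg hne]
        have harg : k + (((h :: t).length : Nat) : Int) = (k + 1) + (t.length : Int) := by
          simp only [List.length_cons]; push_cast; omega
        rw [harg, ih (S + h) (k + 1)]
        cases t with
        | nil => exact absurd rfl ht
        | cons a b => simp

theorem le_foldl_min (c : Int) : ∀ (l : List Int) (a : Int),
    (c ≤ l.foldl min a) ↔ (c ≤ a ∧ ∀ v ∈ l, c ≤ v) := by
  intro l
  induction l with
  | nil => intro a; simp
  | cons h t ih =>
    intro a
    simp only [List.foldl_cons, ih, List.mem_cons]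
    constructor
    · rintro ⟨hm, hall⟩
      refine ⟨le_trans hm (min_le_left _ _), ?_⟩
      rintro v (rfl | hv)
      · exact le_trans hm (min_le_right _ _)
      · exact hall v hv
    · rintro ⟨ha, hall⟩
      exact ⟨le_min ha (hall h (Or.inl rfl)), fun v hv => hall v (Or.inr hv)⟩

theorem foldl_max_le (c : Int) : ∀ (l : List Int) (a : Int),
    (l.foldl max a ≤ c) ↔ (a ≤ c ∧ ∀ v ∈ l, v ≤ c) := by
  intro l
  induction l with
  | nil => intro a; simp
  | cons h t ih =>
    intro a
    simp only [List.foldl_cons, ih, List.mem_cons]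
    constructor
    · rintro ⟨hm, hall⟩
      refine ⟨le_trans (le_max_left _ _) hm, ?_⟩
      rintro v (rfl | hv)
      · exact le_trans (le_max_right _ _) hm
      · exact hall v hv
    · rintro ⟨ha, hall⟩
      exact ⟨max_le ha (hall h (Or.inl rfl)), fun v hv => hall v (Or.inr hv)⟩

theorem allOk_neg (S : Int) (p : List Int) :
    pvAllOk (fun v => decide (v < 0)) S p = decide (∀ v ∈ pvAccumFrom S p, 0 ≤ v) := by
  induction p generalizing S with
  | nil => simp [pvAllOk, pvAccumFrom]
  | cons h t ih =>
    simp only [pvAllOk, pvAccumFrom, ih, List.mem_cons]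
    by_cases hp : S + h < 0 <;> simp [hp] <;> omega

theorem allOk_pos (S : Int) (p : List Int) :
    pvAllOk (fun v => decide (v > 0)) S p = decide (∀ v ∈ pvAccumFrom S p, v ≤ 0) := by
  induction p generalizing S with
  | nil => simp [pvAllOk, pvAccumFrom]
  | cons h t ih =>
    simp only [pvAllOk, pvAccumFrom, ih, List.mem_cons]
    by_cases hp : S + h > 0 <;> simp [hp] <;> omega

theorem min_prefix (p : List Int) :
    (!p.isEmpty && decide (0 ≤ pvMinL (pvPrefixSums p)))
      = (!p.isEmpty && pvAllOk (fun v => decide (v < 0)) 0 p) := by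
  cases p with
  | nil => rfl
  | cons h t =>
    simp only [List.isEmpty, Bool.not_false, Bool.true_and, allOk_neg]
    simp only [pvPrefixSums, pvAccumFrom, pvMinL, List.mem_cons]
    simp only [decide_eq_decide]
    rw [le_foldl_min]
    exact (List.forall_mem_cons).symm

theorem max_prefix (p : List Int) :
    (!p.isEmpty && decide (pvMaxL (pvPrefixSums p) ≤ 0))
      = (!p.isEmpty && pvAllOk (fun v => decide (v > 0)) 0 p) := by
  cases p with
  | nil => rfl
  | cons h t =>
    simp only [List.isEmpty, Bool.not_false, Bool.true_and, allOk_pos]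
    simp only [pvPrefixSums, pvAccumFrom, pvMaxL, List.mem_cons]
    simp only [decide_eq_decide]
    rw [foldl_max_le]
    exact (List.forall_mem_cons (p := fun v : Int => v ≤ 0)).symm

theorem innerA_zero (pred : Int → Bool) (p : List Int) :
    pvInnerA pred p 0 0 (p.length : Int) = (!p.isEmpty && pvAllOk pred 0 p) := by
  have := pvInnerA_eq_allOk pred p 0 0
  simpa using this

-- ===== VERDICT (by name: the statement is the Claim_ definition above) =====
theorem check_geneological_spec : Claim_equal_check_geneological := by
  intro x major_spin _
  unfold Spec_check_geneological check_geneological check_geneological_alt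
  by_cases hms : major_spin ≥ 0
  · simp only [hms, if_pos, if_true]
    rw [PySem.List.foldl_append_if_eq_filter]
    simp only [List.nil_append]
    apply List.filter_congr
    intro p _
    rw [innerA_zero, ← min_prefix]
  · simp only [hms, if_false]
    rw [PySem.List.foldl_append_if_eq_filter]
    simp only [List.nil_append]
    apply List.filter_congr
    intro p _
    rw [innerA_zero, ← max_prefix]
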